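-- pv_equiv track=rewrite | github.com/JasonLai42/CS-CM122 | p3/HP3/basic_assembly.py | get_graph_dict
-- ===== SOURCE A (Python) =====
-- def get_graph_dict(kmer_dict, k):
--     graph_dict = dict()
--     node_degrees = dict()
--     size = k - 1
--     for kmer, count in kmer_dict.items():
--         left_end = kmer[:size]
--         right_end = kmer[1:]
--         if left_end in graph_dict:
--             graph_dict[left_end].append(right_end)
--         else:
--             graph_dict[left_end] = [right_end]
--
--         if left_end in node_degrees:
--             node_degrees[left_end][1] += 1
--         else:
--             node_degrees[left_end] = [0, 1]
--         if right_end in node_degrees: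
--             node_degrees[right_end][0] += 1
--         else:
--             node_degrees[right_end] = [1, 0]
--     return graph_dict, node_degrees
-- ===== SOURCE B (Python) =====
-- def get_graph_dict(kmer_dict, k):
--     # Two-phase: build adjacency by grouping, then derive degrees from counts
--     # of left/right occurrences, keyed in first-appearance order.
--     pairs = [(kmer[:k - 1], kmer[1:]) for kmer in kmer_dict]
--     graph_dict = {}
--     for left, right in pairs:
--         graph_dict.setdefault(left, []).append(right)
--     out_counts = {}
--     in_counts = {}
--     for left, right in pairs:
--         out_counts[left] = out_counts.get(left, 0) + 1
--         in_counts[right] = in_counts.get(right, 0) + 1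
--     order = dict.fromkeys(node for pair in pairs for node in pair)
--     node_degrees = {n: [in_counts.get(n, 0), out_counts.get(n, 0)] for n in order}
--     return graph_dict, node_degrees
-- ===== Notes on version B (the rewrite author's own statement) =====
-- stated objective: alternative
-- what changed: A maintains both dicts in one interleaved loop, mutating two-cell [in,out] lists as it goes; B decomposes the job: it groups edges into the adjacency dict, counts left/right occurrences in two separate count dicts, and assembles node_degrees in one final pass over the nodes in first-appearance order.
import Mathlib
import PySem

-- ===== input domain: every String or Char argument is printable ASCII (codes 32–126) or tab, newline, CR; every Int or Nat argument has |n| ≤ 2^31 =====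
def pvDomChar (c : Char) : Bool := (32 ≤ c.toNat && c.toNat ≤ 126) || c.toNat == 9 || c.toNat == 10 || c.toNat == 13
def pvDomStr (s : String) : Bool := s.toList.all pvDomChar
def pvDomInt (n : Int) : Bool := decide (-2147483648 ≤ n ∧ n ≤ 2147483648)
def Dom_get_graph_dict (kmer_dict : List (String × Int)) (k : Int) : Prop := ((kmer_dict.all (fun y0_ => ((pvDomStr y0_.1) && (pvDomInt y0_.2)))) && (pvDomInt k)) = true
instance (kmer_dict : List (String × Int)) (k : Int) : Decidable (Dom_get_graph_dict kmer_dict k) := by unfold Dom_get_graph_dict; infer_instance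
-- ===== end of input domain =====

-- B replaces A's single interleaved loop (which mutates [in,out] cells as it goes) by a
-- decomposition: group edges into the adjacency dict, then derive degrees from two
-- occurrence-count dicts read off in first-appearance order; same return value (alternative).

-- ===== PORT A =====
-- node_degrees[left_end][1] += 1  — exact here: the stored lists always have length 2
-- (Python would raise IndexError only on shorter lists, which never occur)
def pyInc1 : List Int → List Int
  | a :: b :: t => a :: (b + 1) :: t
  | xs => xs

-- node_degrees[right_end][0] += 1 (same remark)
def pyInc0 : List Int → List Int
  | a :: t => (a + 1) :: t
  | [] => []

def get_graph_dict (kmer_dict : List (String × Int)) (k : Int) :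
    (List (String × List String)) × (List (String × List Int)) :=
  let size := k - 1
  let st := kmer_dict.foldl
    (fun (st : PySem.Dict String (List String) × PySem.Dict String (List Int)) kv =>
      let left_end := PySem.Str.slice kv.1 none (some size)
      let right_end := PySem.Str.slice kv.1 (some 1) none
      let g := if st.1.contains left_end then st.1.modify left_end [] (fun xs => xs ++ [right_end])
               else st.1.insert left_end [right_end]
      let nd := if st.2.contains left_end then st.2.modify left_end [] pyInc1
                else st.2.insert left_end [0, 1]
      let nd := if nd.contains right_end then nd.modify right_end [] pyInc0
                else nd.insert right_end [1, 0]
      (g, nd))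
    (PySem.Dict.empty, PySem.Dict.empty)
  (st.1.items, st.2.items)

-- ===== PORT B =====
def get_graph_dict_alt (kmer_dict : List (String × Int)) (k : Int) :
    (List (String × List String)) × (List (String × List Int)) :=
  let pairs := kmer_dict.map (fun kv =>
    (PySem.Str.slice kv.1 none (some (k - 1)), PySem.Str.slice kv.1 (some 1) none))
  let graph := pairs.foldl
    (fun (g : PySem.Dict String (List String)) p =>
      (g.setdefault p.1 []).modify p.1 [] (fun xs => xs ++ [p.2]))
    PySem.Dict.empty
  let out_counts := pairs.foldl
    (fun (d : PySem.Dict String Int) p => d.insert p.1 (d.getD p.1 0 + 1)) PySem.Dict.empty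
  let in_counts := pairs.foldl
    (fun (d : PySem.Dict String Int) p => d.insert p.2 (d.getD p.2 0 + 1)) PySem.Dict.empty
  let order := PySem.List.dedup (pairs.flatMap (fun p => [p.1, p.2]))
  let node_degrees := order.foldl
    (fun (d : PySem.Dict String (List Int)) n =>
      d.insert n [in_counts.getD n 0, out_counts.getD n 0])
    PySem.Dict.empty
  (graph.items, node_degrees.items)

-- ===== PRECONDITION & SPEC =====
def Spec_get_graph_dict (kmer_dict : List (String × Int)) (k : Int) (out : (List (String × List String)) × (List (String × List Int))) : Prop := out = get_graph_dict_alt kmer_dict k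
instance (kmer_dict : List (String × Int)) (k : Int) (out : (List (String × List String)) × (List (String × List Int))) : Decidable (Spec_get_graph_dict kmer_dict k out) := by unfold Spec_get_graph_dict; infer_instance

-- ===== CLAIM (what is proved, stated in full; the proofs are below) =====
def Claim_equal_get_graph_dict : Prop := ∀ (kmer_dict : List (String × Int)) (k : Int), Dom_get_graph_dict kmer_dict k → Spec_get_graph_dict kmer_dict k (get_graph_dict kmer_dict k)

-- ===== LEMMAS AND PROOFS =====

-- A's degree-loop step, acting on the pair (left_end, right_end)
def degStep (d : PySem.Dict String (List Int)) (p : String × String) : PySem.Dict String (List Int) :=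
  let nd := if d.contains p.1 then d.modify p.1 [] pyInc1 else d.insert p.1 [0, 1]
  if nd.contains p.2 then nd.modify p.2 [] pyInc0 else nd.insert p.2 [1, 0]

-- A's graph-loop step
def graphStep (g : PySem.Dict String (List String)) (p : String × String) : PySem.Dict String (List String) :=
  if g.contains p.1 then g.modify p.1 [] (fun xs => xs ++ [p.2]) else g.insert p.1 [p.2]

-- the (left_end, right_end) pair both programs cut out of a kmer
def endsOf (k : Int) (kv : String × Int) : String × String :=
  (PySem.Str.slice kv.1 none (some (k - 1)), PySem.Str.slice kv.1 (some 1) none)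

def flatPairs (ps : List (String × String)) : List String := ps.flatMap (fun p => [p.1, p.2])

-- B's four phases, as functions of the pair list
def bGraph (ps : List (String × String)) : PySem.Dict String (List String) :=
  ps.foldl (fun g p => (g.setdefault p.1 []).modify p.1 [] (fun xs => xs ++ [p.2])) PySem.Dict.empty
def bOut (ps : List (String × String)) : PySem.Dict String Int :=
  ps.foldl (fun d p => d.insert p.1 (d.getD p.1 0 + 1)) PySem.Dict.empty
def bIn (ps : List (String × String)) : PySem.Dict String Int :=
  ps.foldl (fun d p => d.insert p.2 (d.getD p.2 0 + 1)) PySem.Dict.empty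
def bDeg (ps : List (String × String)) : PySem.Dict String (List Int) :=
  (PySem.List.dedup (flatPairs ps)).foldl
    (fun d n => d.insert n [(bIn ps).getD n 0, (bOut ps).getD n 0]) PySem.Dict.empty

theorem B_unfold (kd : List (String × Int)) (k : Int) :
    get_graph_dict_alt kd k =
      ((bGraph (kd.map (endsOf k))).items, (bDeg (kd.map (endsOf k))).items) := rfl

theorem dictContains_eq (ν : Type) (d : PySem.Dict String ν) (k : String) :
    d.contains k = PySem.Set.contains d.keys k := by
  by_cases h : k ∈ d.keys
  · rw [(PySem.Dict.contains_iff_mem_keys d k).mpr h]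
    simp [PySem.Set.contains, h]
  · have : d.contains k = false := by
      rcases Bool.eq_false_or_eq_true (d.contains k) with h' | h'
      · exact absurd ((PySem.Dict.contains_iff_mem_keys d k).mp h') h
      · exact h'
    rw [this]
    simp [PySem.Set.contains, h]

theorem keys_half (ν : Type) (d : PySem.Dict String ν) (x : String) (d0 v0 : ν) (f : ν → ν) :
    (if d.contains x then d.modify x d0 f else d.insert x v0).keys = PySem.Set.add d.keys x := by
  by_cases h : d.contains x
  · rw [if_pos h, PySem.Dict.keys_modify, PySem.Dict.keys_insert_of_contains _ _ h,
      PySem.Set.add, if_pos (by rw [← dictContains_eq]; exact h)]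
  · rw [if_neg h, PySem.Dict.keys_insert_of_not_contains _ _ (by simpa using h),
      PySem.Set.add, if_neg (by rw [← dictContains_eq]; simpa using h)]

theorem getD_half (ν : Type) (d : PySem.Dict String ν) (x n : String) (d0 v0 : ν) (f : ν → ν) :
    (if d.contains x then d.modify x d0 f else d.insert x v0).getD n d0 =
      if n = x then (if x ∈ d.keys then f (d.getD x d0) else v0) else d.getD n d0 := by
  by_cases h : d.contains x
  · rw [if_pos h, PySem.Dict.getD_modify, if_pos ((PySem.Dict.contains_iff_mem_keys d x).mp h)]
  · rw [if_neg h, PySem.Dict.getD_insert,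
      if_neg (fun hm => h ((PySem.Dict.contains_iff_mem_keys d x).mpr hm))]

theorem keys_degStep (d : PySem.Dict String (List Int)) (p : String × String) :
    (degStep d p).keys = PySem.Set.add (PySem.Set.add d.keys p.1) p.2 := by
  unfold degStep
  rw [keys_half, keys_half]

theorem keys_degFold (ps : List (String × String)) :
    (ps.foldl degStep PySem.Dict.empty).keys = PySem.List.dedup (flatPairs ps) := by
  induction ps using List.reverseRecOn with
  | nil => rfl
  | append_singleton ps p ih =>
      rw [List.foldl_append, List.foldl_cons, List.foldl_nil, keys_degStep, ih]
      show _ = PySem.Set.ofList (flatPairs (ps ++ [p]))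
      rw [PySem.Set.ofList_eq_foldl]
      have : flatPairs (ps ++ [p]) = flatPairs ps ++ [p.1, p.2] := by
        simp [flatPairs]
      rw [this, List.foldl_append, ← PySem.Set.ofList_eq_foldl]
      rfl

theorem getD_degStep (d : PySem.Dict String (List Int)) (p : String × String) (n : String) :
    (degStep d p).getD n [] =
      (if n = p.2 then
        (if p.2 ∈ d.keys ∨ p.2 = p.1 then
          pyInc0 (if p.2 = p.1 then (if p.1 ∈ d.keys then pyInc1 (d.getD p.1 []) else [0, 1])
                  else d.getD p.2 [])
         else [1, 0])
       else if n = p.1 then (if p.1 ∈ d.keys then pyInc1 (d.getD p.1 []) else [0, 1])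
       else d.getD n []) := by
  unfold degStep
  rw [getD_half, getD_half]
  by_cases h2 : n = p.2
  · rw [if_pos h2, if_pos h2]
    have hk : (if d.contains p.1 then d.modify p.1 [] pyInc1 else d.insert p.1 [0, 1]).keys
        = PySem.Set.add d.keys p.1 := keys_half _ _ _ _ _ _
    rw [hk]
    by_cases hm : p.2 ∈ PySem.Set.add d.keys p.1
    · rw [if_pos hm, if_pos ((PySem.Set.mem_add _ _ _).mp hm)]
    · rw [if_neg hm, if_neg (fun hh => hm ((PySem.Set.mem_add _ _ _).mpr hh))]
  · rw [if_neg h2, if_neg h2]; exact getD_half _ _ _ _ _ _ _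

theorem mem_flatPairs (ps : List (String × String)) (n : String) :
    n ∈ flatPairs ps ↔ n ∈ ps.map Prod.fst ∨ n ∈ ps.map Prod.snd := by
  simp only [flatPairs, List.mem_flatMap, List.mem_map, List.mem_cons,
    List.not_mem_nil, or_false]
  aesop

theorem getD_degFold (ps : List (String × String)) : ∀ n : String,
    (ps.foldl degStep PySem.Dict.empty).getD n [] =
      if n ∈ flatPairs ps then
        [((ps.map Prod.snd).count n : Int), ((ps.map Prod.fst).count n : Int)]
      else [] := by
  induction ps using List.reverseRecOn with
  | nil => intro n; simp [flatPairs, PySem.Dict.getD_empty]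
  | append_singleton ps p ih =>
      intro n
      rw [List.foldl_append, List.foldl_cons, List.foldl_nil, getD_degStep]
      have hkeys : (ps.foldl degStep PySem.Dict.empty).keys = PySem.List.dedup (flatPairs ps) :=
        keys_degFold ps
      have hmemk : ∀ m : String, (m ∈ (ps.foldl degStep PySem.Dict.empty).keys) ↔ m ∈ flatPairs ps := by
        intro m; rw [hkeys]; exact PySem.Set.mem_ofList _ _
      have hflat : flatPairs (ps ++ [p]) = flatPairs ps ++ [p.1, p.2] := by simp [flatPairs]
      rw [ih n, ih p.1, ih p.2, hflat]
      simp only [hmemk]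
      have c0 : ∀ m : String, m ∉ flatPairs ps → (ps.map Prod.fst).count m = 0 := by
        intro m hm; exact List.count_eq_zero.mpr (fun h => hm ((mem_flatPairs ps m).mpr (Or.inl h)))
      have c0' : ∀ m : String, m ∉ flatPairs ps → (ps.map Prod.snd).count m = 0 := by
        intro m hm; exact List.count_eq_zero.mpr (fun h => hm ((mem_flatPairs ps m).mpr (Or.inr h)))
      simp only [List.map_append, List.count_append, List.mem_append, List.mem_cons,
        List.map_cons, List.map_nil, List.count_cons, List.count_nil]
      by_cases h2 : n = p.2 <;> by_cases h1 : n = p.1 <;>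
        by_cases hm : n ∈ flatPairs ps <;>
        simp_all [pyInc0, pyInc1, beq_iff_eq] <;> first | omega | tauto

theorem graphStep_eq_alt (g : PySem.Dict String (List String)) (p : String × String) :
    graphStep g p = (g.setdefault p.1 []).modify p.1 [] (fun xs => xs ++ [p.2]) := by
  unfold graphStep
  by_cases h : g.contains p.1
  · rw [PySem.Dict.setdefault_of_contains _ _ h, if_pos h]
  · rw [PySem.Dict.setdefault_of_not_contains _ _ (by simpa using h), if_neg h]
    show g.insert p.1 [p.2] = (g.insert p.1 []).insert p.1 ((g.insert p.1 []).getD p.1 [] ++ [p.2])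
    rw [PySem.Dict.getD_insert_self, PySem.Dict.insert_insert_self]
    rfl

theorem A_fold_split (kd : List (String × Int)) (k : Int) :
    get_graph_dict kd k =
      (((kd.map (endsOf k)).foldl graphStep PySem.Dict.empty).items,
       ((kd.map (endsOf k)).foldl degStep PySem.Dict.empty).items) := by
  unfold get_graph_dict
  show ((kd.foldl (fun s e =>
      ((fun (g : PySem.Dict String (List String)) kv => graphStep g (endsOf k kv)) s.1 e,
       (fun (d : PySem.Dict String (List Int)) kv => degStep d (endsOf k kv)) s.2 e))
      (PySem.Dict.empty, PySem.Dict.empty)).1.items,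
    (kd.foldl (fun s e =>
      ((fun (g : PySem.Dict String (List String)) kv => graphStep g (endsOf k kv)) s.1 e,
       (fun (d : PySem.Dict String (List Int)) kv => degStep d (endsOf k kv)) s.2 e))
      (PySem.Dict.empty, PySem.Dict.empty)).2.items) = _
  have h := PySem.List.foldl_prod_mk
    (fun (g : PySem.Dict String (List String)) kv => graphStep g (endsOf k kv))
    (fun (d : PySem.Dict String (List Int)) kv => degStep d (endsOf k kv))
    kd PySem.Dict.empty PySem.Dict.empty
  rw [h, List.foldl_map, List.foldl_map]

theorem bIn_getD (ps : List (String × String)) (n : String) :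
    (bIn ps).getD n 0 = ((ps.map Prod.snd).count n : Int) := by
  unfold bIn
  rw [← List.foldl_map (f := Prod.snd) (g := fun (d : PySem.Dict String Int) x => d.insert x (d.getD x 0 + 1)),
    PySem.Dict.getD_foldl_insert_add_one]
  simp [PySem.Dict.getD_empty]

theorem bOut_getD (ps : List (String × String)) (n : String) :
    (bOut ps).getD n 0 = ((ps.map Prod.fst).count n : Int) := by
  unfold bOut
  rw [← List.foldl_map (f := Prod.fst) (g := fun (d : PySem.Dict String Int) x => d.insert x (d.getD x 0 + 1)),
    PySem.Dict.getD_foldl_insert_add_one]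
  simp [PySem.Dict.getD_empty]

theorem deg_items (ps : List (String × String)) :
    (ps.foldl degStep PySem.Dict.empty).items = (bDeg ps).items := by
  have hnd : (PySem.List.dedup (flatPairs ps)).Nodup := PySem.Set.nodup_ofList _
  rw [PySem.Dict.items_eq_map_keys _ (by rw [keys_degFold]; exact hnd) [], keys_degFold]
  unfold bDeg
  rw [PySem.Dict.items_foldl_insert_fresh (PySem.List.dedup (flatPairs ps)) (fun a => a)
    (fun n => [(bIn ps).getD n 0, (bOut ps).getD n 0]) PySem.Dict.empty
    (fun a _ => PySem.Dict.contains_empty a) (by rw [List.map_id']; exact hnd)]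
  rw [show (PySem.Dict.empty : PySem.Dict String (List Int)).items = [] from rfl, List.nil_append]
  refine List.map_congr_left ?_
  intro n hn
  have hmem : n ∈ flatPairs ps := (PySem.Set.mem_ofList _ _).mp hn
  rw [getD_degFold ps n, if_pos hmem, bIn_getD, bOut_getD]

theorem main_lemma (kd : List (String × Int)) (k : Int) :
    get_graph_dict kd k = get_graph_dict_alt kd k := by
  rw [A_fold_split, B_unfold]
  refine Prod.ext ?_ ?_
  · show (_ : PySem.Dict String (List String)).items = _
    have : (kd.map (endsOf k)).foldl graphStep PySem.Dict.empty = bGraph (kd.map (endsOf k)) := by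
      unfold bGraph
      exact PySem.List.foldl_congr_mem _ _ _ _ (fun acc x _ => graphStep_eq_alt acc x)
    rw [this]
  · exact deg_items (kd.map (endsOf k))

-- ===== VERDICT (by name: the statement is the Claim_ definition above) =====
theorem get_graph_dict_spec : Claim_equal_get_graph_dict := by
  intro kd k _
  show _ = _
  exact main_lemma kd k
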